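-- pv_equiv track=rewrite | github.com/bh2980/Algorithm-Problem | 프로그래머스/lv2/42626. 더 맵게/더 맵게.py | solution
-- ===== SOURCE A (Python) =====
-- def solution(scoville, K):
--     from collections import deque
--     INF = 9223372036854775807
--
--     count = 0
--
--     scoville = deque(sorted(scoville)) #원래 scoville
--     mix = deque() #새로운 값
--
--     while True:
--         min_val = INF
--
--         if len(mix) == 0:
--             #mix가 비었다면 scoville의 왼쪽 값을 min값으로 설정
--             min_val = scoville[0]
--
--             if min_val < K:
--                 min_val = scoville.popleft()
--                 try:
--                     second_val = scoville.popleft()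
--                 except: #하나 밖에 없는 원소가 K보다 작다면
--                     return -1
--
--                 new_val = min_val + second_val * 2
--                 mix.append(new_val)
--                 count += 1
--             else:
--                 return count
--         else:
--             #mix가 비지 않았다면 두 queue 중 최솟값을 설정
--             if scoville[0] <= mix[0]:
--                 min_val = scoville.popleft()
--             else:
--                 min_val = mix.popleft()
--
--             if min_val < K:
--                 #scoville이나 mix가 비었을 수도 있음
--                 temp1 = INF
--                 temp2 = INF
--
--                 if len(scoville) > 0:
--                     temp1 = scoville[0]
--
--                 if len(mix) > 0:
--                     temp2 = mix[0]
--
--                 if temp1 == INF and temp2 == INF: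
--                     #둘 다 비었으면 하나 밖에 없는 원소 < K이므로 return -1
--                     return -1
--
--                 second_val = scoville.popleft() if temp1 <= temp2 else mix.popleft()
--
--                 new_val = min_val + second_val * 2
--                 mix.append(new_val)
--                 count += 1
--             else:
--                 return count
--
--         #scoville이 비었다면 mix의 모든 원소를 scoville로 옮김
--         if len(scoville) == 0:
--             while len(mix) > 0:
--                 scoville.append(mix.popleft())
-- ===== SOURCE B (Python) =====
-- def _insort(pool, x):
--     # insert x into the sorted list pool, before the first strictly greater element
--     i = 0
--     while i < len(pool) and pool[i] <= x:
--         i += 1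
--     pool.insert(i, x)
--
--
-- def solution(scoville, K):
--     pool = sorted(scoville)
--     count = 0
--     while pool[0] < K:
--         if len(pool) == 1:
--             return -1
--         first = pool.pop(0)
--         second = pool.pop(0)
--         _insort(pool, first + 2 * second)
--         count += 1
--     return count
-- ===== Notes on version B (the rewrite author's own statement) =====
-- stated objective: simpler
-- what changed: A's two-deque sorted-merge with an INF sentinel and a mix-to-scoville transfer phase is replaced by a single sorted pool: pop the two smallest, insert first+2*second back in order, count the mixes.
-- outside the precondition, e.g. on solution([], 0): A raises IndexError, B raises IndexError
import Mathlib
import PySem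

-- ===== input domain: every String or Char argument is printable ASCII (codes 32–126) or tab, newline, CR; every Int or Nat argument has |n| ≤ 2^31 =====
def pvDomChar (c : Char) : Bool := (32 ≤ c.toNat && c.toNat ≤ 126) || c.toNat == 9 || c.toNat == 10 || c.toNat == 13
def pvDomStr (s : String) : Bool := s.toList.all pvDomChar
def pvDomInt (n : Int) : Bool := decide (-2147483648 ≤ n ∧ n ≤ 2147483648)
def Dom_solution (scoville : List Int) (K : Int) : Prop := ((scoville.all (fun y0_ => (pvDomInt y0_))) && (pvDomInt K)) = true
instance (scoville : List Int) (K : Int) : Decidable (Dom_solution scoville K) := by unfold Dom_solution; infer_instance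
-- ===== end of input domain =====

-- B replaces A's two-deque sorted-merge (INF sentinel, transfer phase) by a single sorted
-- pool with an ordered re-insert per mix; equivalence of the RETURN values is proved on
-- nonempty lists (Python A raises IndexError on []).

-- ===== PORT A =====
def pyINF : Int := 9223372036854775807

-- temp = deque[0] if the deque is nonempty else INF (A's sentinel bookkeeping)
def pyHeadD : List Int → Int
  | [] => pyINF
  | x :: _ => x

-- A's while-loop over the two deques; fuel only makes the recursion total (one unit per
-- iteration suffices: each iteration removes two elements and appends one).
def solLoopA (K : Int) : Nat → List Int → List Int → Int → Int
  | 0, _, _, _ => 0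
  | Nat.succ fuel, scov, mix, count =>
    match mix, scov with
    | [], [] => 0          -- Python: scoville[0] raises IndexError (outside Pre_solution)
    | [], s0 :: stail =>
      if s0 < K then
        match stail with
        | [] => -1                                   -- second popleft raises → except: return -1
        | s1 :: stail2 =>
          let newv := s0 + s1 * 2
          -- append to mix, then the trailing transfer `if len(scoville)==0`
          if stail2 = [] then solLoopA K fuel [newv] [] (count + 1)
          else solLoopA K fuel stail2 [newv] (count + 1)
      else count
    | _ :: _, [] => 0      -- Python would raise on scoville[0]; unreachable from solution's start state
    | m0 :: mtail, s0 :: stail =>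
      if s0 ≤ m0 then
        -- min_val = scoville.popleft()
        if s0 < K then
          let temp1 := pyHeadD stail
          let temp2 := m0
          if temp1 = pyINF ∧ temp2 = pyINF then -1
          else if temp1 ≤ temp2 then
            match stail with
            | [] => 0                                -- unreachable: temp1 = INF forces temp2 = INF
            | s1 :: stail2 =>
              let newv := s0 + s1 * 2
              if stail2 = [] then solLoopA K fuel ((m0 :: mtail) ++ [newv]) [] (count + 1)
              else solLoopA K fuel stail2 ((m0 :: mtail) ++ [newv]) (count + 1)
          else
            let newv := s0 + m0 * 2
            if stail = [] then solLoopA K fuel (mtail ++ [newv]) [] (count + 1)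
            else solLoopA K fuel stail (mtail ++ [newv]) (count + 1)
        else count
      else
        -- min_val = mix.popleft()
        if m0 < K then
          let temp1 := s0
          let temp2 := pyHeadD mtail
          if temp1 = pyINF ∧ temp2 = pyINF then -1
          else if temp1 ≤ temp2 then
            let newv := m0 + s0 * 2
            if stail = [] then solLoopA K fuel (mtail ++ [newv]) [] (count + 1)
            else solLoopA K fuel stail (mtail ++ [newv]) (count + 1)
          else
            match mtail with
            | [] => 0                                -- unreachable: temp2 = INF ≥ temp1
            | m1 :: mtail2 =>
              let newv := m0 + m1 * 2
              if (s0 :: stail) = ([] : List Int) then solLoopA K fuel (mtail2 ++ [newv]) [] (count + 1)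
              else solLoopA K fuel (s0 :: stail) (mtail2 ++ [newv]) (count + 1)
        else count

def solution (scoville : List Int) (K : Int) : Int :=
  solLoopA K (scoville.length + 1) (PySem.List.sorted scoville (fun x => x) false) [] 0

-- ===== PORT B =====
-- _insort: insert x into a sorted list before the first strictly greater element
def insortB (x : Int) : List Int → List Int
  | [] => [x]
  | y :: ys => if x < y then x :: y :: ys else y :: insortB x ys

-- B's while-loop over the single sorted pool (fuel as above)
def solLoopB (K : Int) : Nat → List Int → Int → Int
  | 0, _, _ => 0
  | Nat.succ fuel, pool, count =>
    match pool with
    | [] => 0              -- Python: pool[0] raises IndexError (outside Pre_solution)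
    | p0 :: rest =>
      if p0 < K then
        match rest with
        | [] => -1
        | p1 :: rest2 => solLoopB K fuel (insortB (p0 + 2 * p1) rest2) (count + 1)
      else count

def solution_alt (scoville : List Int) (K : Int) : Int :=
  solLoopB K (scoville.length + 1) (PySem.List.sorted scoville (fun x => x) false) 0

-- ===== PRECONDITION & SPEC =====
-- Pre_ excludes only the empty list, on which Python A raises IndexError at scoville[0].
def Pre_solution (scoville : List Int) (K : Int) : Prop := scoville ≠ []
instance (scoville : List Int) (K : Int) : Decidable (Pre_solution scoville K) := by
  unfold Pre_solution; infer_instance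

def pvWitness_solution : List Int × Int := ([1, 2, 3, 9, 10, 12], 7)

def Spec_solution (scoville : List Int) (K : Int) (out : Int) : Prop := out = solution_alt scoville K
instance (scoville : List Int) (K : Int) (out : Int) : Decidable (Spec_solution scoville K out) := by
  unfold Spec_solution; infer_instance

-- ===== CLAIM (what is proved, stated in full; the proofs are below) =====
def Claim_equal_solution : Prop := ∀ (scoville : List Int) (K : Int), Dom_solution scoville K → Pre_solution scoville K → Spec_solution scoville K (solution scoville K)

-- ===== LEMMAS AND PROOFS =====

-- the loop invariant on A's mix deque: every mix element is bounded by min x y + 2 * max x y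
-- for ANY two elements x, y that sat in front of it (in scoville or earlier in mix) when it
-- was created; this is what keeps mix sorted and its head the minimum of mix.
def InvMix (s m : List Int) : Prop :=
  ∀ (pre : List Int) (e : Int) (post : List Int), m = pre ++ e :: post →
    ∀ x y : Int, [x, y].Sublist (s ++ pre) → e ≤ min x y + 2 * max x y

lemma insortB_perm (x : Int) (l : List Int) : (insortB x l).Perm (x :: l) := by
  induction l with
  | nil => simp [insortB]
  | cons y ys ih =>
    simp only [insortB]
    split
    · exact List.Perm.refl _
    · exact (ih.cons y).trans (List.Perm.swap x y ys)

lemma insortB_pairwise (x : Int) (l : List Int) (hl : l.Pairwise (· ≤ ·)) :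
    (insortB x l).Pairwise (· ≤ ·) := by
  induction l with
  | nil => simp [insortB]
  | cons y ys ih =>
    rcases List.pairwise_cons.mp hl with ⟨hy, hys⟩
    simp only [insortB]
    split
    · rename_i hxy
      refine List.pairwise_cons.mpr ⟨?_, hl⟩
      intro a ha
      rcases List.mem_cons.mp ha with rfl | ha
      · exact le_of_lt hxy
      · exact le_trans (le_of_lt hxy) (hy a ha)
    · rename_i hxy
      refine List.pairwise_cons.mpr ⟨?_, ih hys⟩
      intro a ha
      have := (insortB_perm x ys).mem_iff.mp ha
      rcases List.mem_cons.mp this with rfl | ha'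
      · omega
      · exact hy a ha'

lemma head_le {a : Int} {l : List Int} (h : (a :: l).Pairwise (· ≤ ·)) : ∀ x ∈ l, a ≤ x :=
  (List.pairwise_cons.mp h).1

lemma pair_sublist_head2 (x y : Int) (l : List Int) : [x, y].Sublist (x :: y :: l) :=
  ((List.nil_sublist l).cons₂ y).cons₂ x

lemma pair_sublist_cons_mem (x y : Int) (l1 l2 : List Int) (hy : y ∈ l2) :
    [x, y].Sublist (x :: (l1 ++ l2)) :=
  ((List.singleton_sublist.mpr hy).trans (List.sublist_append_right l1 l2)).cons₂ x

lemma sorted_perm_cons {p t : List Int} {a : Int} (hp : p.Pairwise (· ≤ ·))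
    (hperm : p.Perm (a :: t)) (hmin : ∀ x ∈ t, a ≤ x) :
    ∃ t', p = a :: t' ∧ t'.Perm t := by
  cases p with
  | nil => exact absurd hperm.symm (by simp)
  | cons q t' =>
    have hq : q ∈ a :: t := hperm.subset (by simp)
    have hqa : a ≤ q := by
      rcases List.mem_cons.mp hq with rfl | h
      · exact le_refl _
      · exact hmin q h
    have haq : q ≤ a := by
      have ha : a ∈ q :: t' := hperm.mem_iff.mpr (by simp)
      rcases List.mem_cons.mp ha with rfl | h
      · exact le_refl _
      · exact (List.pairwise_cons.mp hp).1 a h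
    have : q = a := le_antisymm haq hqa
    subst this
    exact ⟨t', rfl, hperm.cons_inv⟩

lemma sorted_perm_eq {q : List Int} : ∀ {p : List Int}, p.Pairwise (· ≤ ·) →
    q.Pairwise (· ≤ ·) → p.Perm q → p = q := by
  induction q with
  | nil => intro p _ _ h; exact h.eq_nil
  | cons a t iht =>
    intro p hp hq h
    obtain ⟨t', rfl, ht'⟩ := sorted_perm_cons hp h (head_le hq)
    rw [iht (List.pairwise_cons.mp hp).2 (List.pairwise_cons.mp hq).2 ht']

lemma append_singleton_eq {l pre post : List Int} {v e : Int}
    (h : l ++ [v] = pre ++ e :: post) :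
    (pre = l ∧ e = v ∧ post = []) ∨ ∃ post', post = post' ++ [v] ∧ l = pre ++ e :: post' := by
  induction pre generalizing l with
  | nil =>
    cases l with
    | nil => simp_all
    | cons h0 t0 =>
      simp only [List.cons_append, List.nil_append, List.cons.injEq] at h
      exact Or.inr ⟨t0, h.2.symm, by simp [h.1]⟩
  | cons hp tp ih =>
    cases l with
    | nil =>
      exfalso
      simp only [List.nil_append, List.cons_append, List.cons.injEq] at h
      have := h.2
      simp at this
    | cons h0 t0 =>
      simp only [List.cons_append, List.cons.injEq] at h
      rcases ih h.2 with ⟨h1, h2, h3⟩ | ⟨post', h4, h5⟩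
      · exact Or.inl ⟨by simp [h.1, h1], h2, h3⟩
      · exact Or.inr ⟨post', h4, by simp [h.1, h5]⟩

lemma newv_le_pair {a b : Int} {u : List Int} (hab : a ≤ b) (hge : ∀ z ∈ u, b ≤ z) :
    ∀ x y : Int, [x, y].Sublist u → a + b * 2 ≤ min x y + 2 * max x y := by
  intro x y h
  have hx : b ≤ x := hge x (h.subset (by simp))
  have hy : b ≤ y := hge y (h.subset (by simp))
  rcases le_total x y with hxy | hxy
  · simp only [min_eq_left hxy, max_eq_right hxy]; omega
  · simp only [min_eq_right hxy, max_eq_left hxy]; omega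

lemma bound_step {K p0 p1 : Int} {r : List Int}
    (hsorted : (p0 :: p1 :: r).Pairwise (· ≤ ·))
    (hb : (∀ x ∈ p0 :: p1 :: r, x ≤ 6442450944) ∨ (∀ x ∈ p0 :: p1 :: r, K ≤ x))
    (h0 : p0 < K) (hK : K ≤ 2147483648) :
    (∀ x ∈ insortB (p0 + 2 * p1) r, x ≤ 6442450944) ∨
      (∀ x ∈ insortB (p0 + 2 * p1) r, K ≤ x) := by
  have h1 : ∀ x ∈ p0 :: p1 :: r, x ≤ 6442450944 := by
    rcases hb with hb | hb
    · exact hb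
    · exact absurd (hb p0 (by simp)) (by omega)
  have hmem : ∀ x ∈ insortB (p0 + 2 * p1) r, x = p0 + 2 * p1 ∨ x ∈ r := by
    intro x hx
    have := (insortB_perm _ _).mem_iff.mp hx
    simpa using this
  by_cases hv : p0 + 2 * p1 ≤ 6442450944
  · left
    intro x hx
    rcases hmem x hx with rfl | hx'
    · exact hv
    · exact h1 x (by simp [hx'])
  · right
    have hp1 : 2147483648 < p1 := by
      have := h1 p0 (by simp)
      omega
    intro x hx
    rcases hmem x hx with rfl | hx'
    · omega
    · have : p1 ≤ x := (List.pairwise_cons.mp (List.pairwise_cons.mp hsorted).2).1 x hx'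
      omega

-- one continuing loop iteration: A has popped the two smallest values a ≤ b, its next
-- state is (s2, m2 ++ [a + b*2]) with the trailing transfer; B inserts a + 2*b into rest2.
lemma continue_step (K : Int) (fuel : Nat) (c : Int)
    (ih : ∀ (s m p : List Int) (c : Int),
      s.Pairwise (· ≤ ·) → m.Pairwise (· ≤ ·) → (m ≠ [] → s ≠ []) →
      p.Pairwise (· ≤ ·) → p.Perm (s ++ m) →
      ((∀ x ∈ p, x ≤ 6442450944) ∨ (∀ x ∈ p, K ≤ x)) →
      InvMix s m →
      solLoopA K fuel s m c = solLoopB K fuel p c)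
    (s2 m2 rest2 : List Int) (a b : Int)
    (hab : a ≤ b)
    (hs2 : s2.Pairwise (· ≤ ·)) (hm2 : m2.Pairwise (· ≤ ·))
    (hub : ∀ e ∈ m2, e ≤ a + b * 2)
    (hInv2 : ∀ (pre : List Int) (e : Int) (post : List Int), m2 = pre ++ e :: post →
      ∀ x y : Int, [x, y].Sublist (s2 ++ pre) → e ≤ min x y + 2 * max x y)
    (hge : ∀ z ∈ s2 ++ m2, b ≤ z)
    (hperm : rest2.Perm (s2 ++ m2))
    (hrs : rest2.Pairwise (· ≤ ·))
    (hbound : (∀ x ∈ insortB (a + 2 * b) rest2, x ≤ 6442450944) ∨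
      (∀ x ∈ insortB (a + 2 * b) rest2, K ≤ x)) :
    (if s2 = [] then solLoopA K fuel (m2 ++ [a + b * 2]) [] c
      else solLoopA K fuel s2 (m2 ++ [a + b * 2]) c)
      = solLoopB K fuel (insortB (a + 2 * b) rest2) c := by
  have hv : a + 2 * b = a + b * 2 := by ring
  have hm3 : (m2 ++ [a + b * 2]).Pairwise (· ≤ ·) := by
    refine List.pairwise_append.mpr ⟨hm2, List.pairwise_singleton _ _, ?_⟩
    intro e he f hf
    rcases List.mem_singleton.mp hf with rfl
    exact hub e he
  have hpsorted : (insortB (a + 2 * b) rest2).Pairwise (· ≤ ·) := insortB_pairwise _ _ hrs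
  have hpperm : (insortB (a + 2 * b) rest2).Perm (s2 ++ (m2 ++ [a + b * 2])) := by
    rw [hv]
    refine (insortB_perm _ _).trans ?_
    refine ((hperm.cons (a + b * 2)).trans ?_)
    rw [← List.append_assoc]
    exact (List.perm_append_singleton _ _).symm
  have hInv3 : InvMix s2 (m2 ++ [a + b * 2]) := by
    intro pre e post hsplit x y hxy
    rcases append_singleton_eq hsplit with ⟨rfl, rfl, rfl⟩ | ⟨post', rfl, hm⟩
    · exact hv ▸ newv_le_pair hab hge x y hxy
    · refine hInv2 pre e post' hm x y (hxy.trans ?_)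
      exact List.Sublist.append (List.Sublist.refl s2) (by simp)
  by_cases hs2e : s2 = []
  · subst hs2e
    refine ih (m2 ++ [a + b * 2]) [] _ c (by simpa using hm3) (by simp) (by simp)
      hpsorted (by simpa using hpperm) hbound ?_
    intro pre e post h
    exact absurd h (by simp)
  · simp only [if_neg hs2e]
    exact ih s2 (m2 ++ [a + b * 2]) _ c hs2 hm3 (fun _ => hs2e) hpsorted hpperm hbound hInv3

-- the main loop equivalence: A's two-deque state (s, m) against B's sorted pool p
lemma loop_eq (K : Int) (hK : K ≤ 2147483648) :
    ∀ (fuel : Nat) (s m p : List Int) (c : Int),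
      s.Pairwise (· ≤ ·) → m.Pairwise (· ≤ ·) → (m ≠ [] → s ≠ []) →
      p.Pairwise (· ≤ ·) → p.Perm (s ++ m) →
      ((∀ x ∈ p, x ≤ 6442450944) ∨ (∀ x ∈ p, K ≤ x)) →
      InvMix s m →
      solLoopA K fuel s m c = solLoopB K fuel p c := by
  intro fuel
  induction fuel with
  | zero => intro s m p c _ _ _ _ _ _ _; rfl
  | succ fuel ih =>
    intro s m p c hs hm hsm hp hperm hb hInv
    cases m with
    | nil =>
      cases s with
      | nil =>
        have hp0 : p = [] := List.Perm.eq_nil (by simpa using hperm)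
        subst hp0
        simp [solLoopA, solLoopB]
      | cons s0 stail =>
        have hps : p = s0 :: stail := sorted_perm_eq hp hs (by simpa using hperm)
        subst hps
        simp only [solLoopA, solLoopB]
        by_cases hK0 : s0 < K
        · rw [if_pos hK0, if_pos hK0]
          cases stail with
          | nil => rfl
          | cons s1 stail2 =>
            have hs01 : s0 ≤ s1 := head_le hs s1 (by simp)
            have hs1le : ∀ x ∈ stail2, s1 ≤ x := head_le (List.pairwise_cons.mp hs).2
            refine continue_step K fuel (c + 1) ih stail2 [] stail2 s0 s1 hs01
              ((List.pairwise_cons.mp (List.pairwise_cons.mp hs).2).2) (by simp)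
              (by simp) (by intro pre e post h; simp at h) (by simpa using hs1le)
              (by simp) ((List.pairwise_cons.mp (List.pairwise_cons.mp hs).2).2)
              (bound_step hs hb hK0 hK)
        · rw [if_neg hK0, if_neg hK0]
    | cons m0 mtail =>
      have hsne : s ≠ [] := hsm (by simp)
      cases s with
      | nil => exact absurd rfl hsne
      | cons s0 stail =>
        have hs0le : ∀ x ∈ stail, s0 ≤ x := head_le hs
        have hm0le : ∀ x ∈ mtail, m0 ≤ x := head_le hm
        have hstl : stail.Pairwise (· ≤ ·) := (List.pairwise_cons.mp hs).2
        have hmtl : mtail.Pairwise (· ≤ ·) := (List.pairwise_cons.mp hm).2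
        by_cases hcmp : s0 ≤ m0
        · -- A pops s0 as the minimum
          have hminfact : ∀ x ∈ stail ++ (m0 :: mtail), s0 ≤ x := by
            intro x hx
            rcases List.mem_append.mp hx with hx | hx
            · exact hs0le x hx
            · rcases List.mem_cons.mp hx with rfl | hx
              · exact hcmp
              · exact le_trans hcmp (hm0le x hx)
          obtain ⟨t, rfl, htperm⟩ := sorted_perm_cons hp (by simpa using hperm) hminfact
          have ht : t.Pairwise (· ≤ ·) := (List.pairwise_cons.mp hp).2
          simp only [solLoopA, solLoopB]
          rw [if_pos hcmp]
          by_cases hK0 : s0 < K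
          · rw [if_pos hK0, if_pos hK0]
            have hC : ∀ x ∈ s0 :: t, x ≤ 6442450944 := by
              rcases hb with hC | hbad
              · exact hC
              · exact absurd (hbad s0 (by simp)) (by omega)
            have hm0C : m0 ≤ 6442450944 :=
              hC m0 (by simp [htperm.mem_iff])
            cases stail with
            | nil =>
              -- temp1 = INF, second popped from mix
              simp only [pyHeadD]
              rw [if_neg (show ¬(True ∧ m0 = pyINF) by simp only [pyINF]; omega)]
              rw [if_neg (show ¬(pyINF ≤ m0) by simp only [pyINF]; omega)]
              rw [if_pos trivial]
              obtain ⟨t2, rfl, ht2perm⟩ := sorted_perm_cons ht (by simpa using htperm) hm0le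
              have hub : ∀ e ∈ mtail, e ≤ s0 + m0 * 2 := by
                intro e he
                obtain ⟨pre', post', rfl⟩ := List.append_of_mem he
                have := hInv (m0 :: pre') e post' (by simp) s0 m0
                  (pair_sublist_head2 s0 m0 pre')
                rw [min_eq_left hcmp, max_eq_right hcmp] at this
                omega
              have hInv2 : ∀ (pre : List Int) (e : Int) (post : List Int),
                  mtail = pre ++ e :: post →
                  ∀ x y : Int, [x, y].Sublist (([] : List Int) ++ pre) →
                    e ≤ min x y + 2 * max x y := by
                intro pre e post h x y hxy
                refine hInv (m0 :: pre) e post (by simp [h]) x y (hxy.trans ?_)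
                exact (List.sublist_cons_self m0 pre).trans (List.sublist_cons_self s0 _)
              have key := continue_step K fuel (c + 1) ih [] mtail t2 s0 m0 hcmp (by simp)
                hmtl hub hInv2 (by simpa using hm0le) (by simpa using ht2perm)
                ((List.pairwise_cons.mp ht).2) (bound_step hp (Or.inl hC) hK0 hK)
              simpa using key
            | cons s1 stail2 =>
              simp only [pyHeadD]
              have hs1C : s1 ≤ 6442450944 := hC s1 (by simp [htperm.mem_iff])
              rw [if_neg (show ¬(s1 = pyINF ∧ m0 = pyINF) by simp only [pyINF]; omega)]
              have hs1le : ∀ x ∈ stail2, s1 ≤ x := head_le hstl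
              by_cases hsm1 : s1 ≤ m0
              · -- second = s1, both pops from scoville
                rw [if_pos hsm1]
                have hminfact2 : ∀ x ∈ stail2 ++ (m0 :: mtail), s1 ≤ x := by
                  intro x hx
                  rcases List.mem_append.mp hx with hx | hx
                  · exact hs1le x hx
                  · rcases List.mem_cons.mp hx with rfl | hx
                    · exact hsm1
                    · exact le_trans hsm1 (hm0le x hx)
                obtain ⟨t2, rfl, ht2perm⟩ := sorted_perm_cons ht (by simpa using htperm) hminfact2
                have hs01 : s0 ≤ s1 := head_le hs s1 (by simp)
                refine continue_step K fuel (c + 1) ih stail2 (m0 :: mtail) t2 s0 s1 hs01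
                  (List.pairwise_cons.mp hstl).2 hm ?_ ?_ ?_ ht2perm
                  ((List.pairwise_cons.mp ht).2) (bound_step hp (Or.inl hC) hK0 hK)
                · intro e he
                  obtain ⟨pre', post', h'⟩ := List.append_of_mem he
                  have := hInv pre' e post' h' s0 s1
                    ((pair_sublist_head2 s0 s1 stail2).trans
                      (List.sublist_append_left (s0 :: s1 :: stail2) pre'))
                  rw [min_eq_left hs01, max_eq_right hs01] at this
                  omega
                · intro pre e post h x y hxy
                  refine hInv pre e post h x y (hxy.trans ?_)
                  simp only [List.cons_append]
                  exact ((stail2.sublist_cons_self s1).trans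
                    ((s1 :: stail2).sublist_cons_self s0)).append (List.Sublist.refl pre)
                · intro z hz
                  rcases List.mem_append.mp hz with hz | hz
                  · exact hs1le z hz
                  · rcases List.mem_cons.mp hz with rfl | hz
                    · exact hsm1
                    · exact le_trans hsm1 (hm0le z hz)
              · -- second = m0, popped from mix
                rw [if_neg hsm1]
                have hm0s1 : m0 < s1 := by omega
                have hminfact2 : ∀ x ∈ (s1 :: stail2) ++ mtail, m0 ≤ x := by
                  intro x hx
                  rcases List.mem_append.mp hx with hx | hx
                  · rcases List.mem_cons.mp hx with rfl | hx
                    · exact le_of_lt hm0s1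
                    · exact le_trans (le_of_lt hm0s1) (hs1le x hx)
                  · exact hm0le x hx
                obtain ⟨t2, rfl, ht2perm⟩ :=
                  sorted_perm_cons ht (htperm.trans List.perm_middle) hminfact2
                refine continue_step K fuel (c + 1) ih (s1 :: stail2) mtail t2 s0 m0 hcmp
                  hstl hmtl ?_ ?_ hminfact2 ht2perm
                  ((List.pairwise_cons.mp ht).2) (bound_step hp (Or.inl hC) hK0 hK)
                · intro e he
                  obtain ⟨pre', post', rfl⟩ := List.append_of_mem he
                  have := hInv (m0 :: pre') e post' (by simp) s0 m0
                    (pair_sublist_cons_mem s0 m0 (s1 :: stail2) (m0 :: pre') (by simp))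
                  rw [min_eq_left hcmp, max_eq_right hcmp] at this
                  omega
                · intro pre e post h x y hxy
                  refine hInv (m0 :: pre) e post (by simp [h]) x y (hxy.trans ?_)
                  simp only [List.cons_append]
                  exact (((List.Sublist.refl (s1 :: stail2)).append
                    (pre.sublist_cons_self m0)).trans
                    (((s1 :: stail2) ++ m0 :: pre).sublist_cons_self s0))
          · rw [if_neg hK0, if_neg hK0]
        · -- A pops m0 as the minimum
          have hm0s0 : m0 < s0 := by omega
          have hminfact : ∀ x ∈ (s0 :: stail) ++ mtail, m0 ≤ x := by
            intro x hx
            rcases List.mem_append.mp hx with hx | hx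
            · rcases List.mem_cons.mp hx with rfl | hx
              · exact le_of_lt hm0s0
              · exact le_trans (le_of_lt hm0s0) (hs0le x hx)
            · exact hm0le x hx
          obtain ⟨t, rfl, htperm⟩ :=
            sorted_perm_cons hp (hperm.trans List.perm_middle) hminfact
          have ht : t.Pairwise (· ≤ ·) := (List.pairwise_cons.mp hp).2
          simp only [solLoopA, solLoopB]
          rw [if_neg hcmp]
          by_cases hK0 : m0 < K
          · rw [if_pos hK0, if_pos hK0]
            have hC : ∀ x ∈ m0 :: t, x ≤ 6442450944 := by
              rcases hb with hC | hbad
              · exact hC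
              · exact absurd (hbad m0 (by simp)) (by omega)
            have hs0C : s0 ≤ 6442450944 := hC s0 (by simp [htperm.mem_iff])
            cases mtail with
            | nil =>
              -- temp2 = INF, second popped from scoville
              simp only [pyHeadD]
              rw [if_neg (show ¬(s0 = pyINF ∧ True) by simp only [pyINF]; omega)]
              rw [if_pos (show s0 ≤ pyINF by simp only [pyINF]; omega)]
              have hts : t = s0 :: stail := sorted_perm_eq ht hs (by simpa using htperm)
              subst hts
              refine continue_step K fuel (c + 1) ih stail [] stail m0 s0
                (le_of_lt hm0s0) hstl (by simp) (by simp)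
                (by intro pre e post h; simp at h) (by simpa using hs0le)
                (by simp) hstl (bound_step hp (Or.inl hC) hK0 hK)
            | cons m1 mtail2 =>
              simp only [pyHeadD]
              have hm01 : m0 ≤ m1 := head_le hm m1 (by simp)
              have hm1le : ∀ x ∈ mtail2, m1 ≤ x := head_le hmtl
              rw [if_neg (show ¬(s0 = pyINF ∧ m1 = pyINF) by simp only [pyINF]; omega)]
              by_cases hsm1 : s0 ≤ m1
              · -- second = s0
                rw [if_pos hsm1]
                have hminfact2 : ∀ x ∈ stail ++ (m1 :: mtail2), s0 ≤ x := by
                  intro x hx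
                  rcases List.mem_append.mp hx with hx | hx
                  · exact hs0le x hx
                  · rcases List.mem_cons.mp hx with rfl | hx
                    · exact hsm1
                    · exact le_trans hsm1 (hm1le x hx)
                obtain ⟨t2, rfl, ht2perm⟩ := sorted_perm_cons ht (by simpa using htperm) hminfact2
                refine continue_step K fuel (c + 1) ih stail (m1 :: mtail2) t2 m0 s0
                  (le_of_lt hm0s0) hstl hmtl ?_ ?_ hminfact2 ht2perm
                  ((List.pairwise_cons.mp ht).2) (bound_step hp (Or.inl hC) hK0 hK)
                · intro e he
                  obtain ⟨pre', post', h'⟩ := List.append_of_mem he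
                  have := hInv (m0 :: pre') e post' (by simp [h']) s0 m0
                    (pair_sublist_cons_mem s0 m0 stail (m0 :: pre') (by simp))
                  rw [min_eq_right (le_of_lt hm0s0), max_eq_left (le_of_lt hm0s0)] at this
                  omega
                · intro pre e post h x y hxy
                  refine hInv (m0 :: pre) e post (by simp [h]) x y (hxy.trans ?_)
                  simp only [List.cons_append]
                  exact (((List.Sublist.refl stail).append
                    (pre.sublist_cons_self m0)).trans
                    ((stail ++ m0 :: pre).sublist_cons_self s0))
              · -- second = m1
                rw [if_neg hsm1]
                have hm1s0 : m1 < s0 := by omega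
                have hminfact2 : ∀ x ∈ (s0 :: stail) ++ mtail2, m1 ≤ x := by
                  intro x hx
                  rcases List.mem_append.mp hx with hx | hx
                  · rcases List.mem_cons.mp hx with rfl | hx
                    · exact le_of_lt hm1s0
                    · exact le_trans (le_of_lt hm1s0) (hs0le x hx)
                  · exact hm1le x hx
                obtain ⟨t2, rfl, ht2perm⟩ :=
                  sorted_perm_cons ht (htperm.trans List.perm_middle) hminfact2
                refine continue_step K fuel (c + 1) ih (s0 :: stail) mtail2 t2 m0 m1 hm01
                  hs (List.pairwise_cons.mp hmtl).2 ?_ ?_ hminfact2 ht2perm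
                  ((List.pairwise_cons.mp ht).2) (bound_step hp (Or.inl hC) hK0 hK)
                · intro e he
                  obtain ⟨pre', post', rfl⟩ := List.append_of_mem he
                  have := hInv (m0 :: m1 :: pre') e post' (by simp) m0 m1
                    ((pair_sublist_head2 m0 m1 pre').trans
                      (List.sublist_append_right (s0 :: stail) (m0 :: m1 :: pre')))
                  rw [min_eq_left hm01, max_eq_right hm01] at this
                  omega
                · intro pre e post h x y hxy
                  refine hInv (m0 :: m1 :: pre) e post (by simp [h]) x y (hxy.trans ?_)
                  exact (List.Sublist.refl (s0 :: stail)).append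
                    ((pre.sublist_cons_self m1).trans ((m1 :: pre).sublist_cons_self m0))
          · rw [if_neg hK0, if_neg hK0]

-- ===== VERDICT (by name: the statement is the Claim_ definition above) =====
theorem solution_spec : Claim_equal_solution := by
  unfold Claim_equal_solution Spec_solution
  intro scoville K hdom _
  have hdom' : (∀ x ∈ scoville, x ≤ 2147483648) ∧ K ≤ 2147483648 := by
    unfold Dom_solution pvDomInt at hdom
    simp only [Bool.and_eq_true, List.all_eq_true, decide_eq_true_eq] at hdom
    exact ⟨fun x hx => (hdom.1 x hx).2, hdom.2.2⟩
  unfold solution solution_alt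
  refine loop_eq K hdom'.2 (scoville.length + 1)
    (PySem.List.sorted scoville (fun x => x) false) []
    (PySem.List.sorted scoville (fun x => x) false) 0
    (PySem.List.sorted_pairwise scoville (fun x => x)) (by simp) (by simp)
    (PySem.List.sorted_pairwise scoville (fun x => x)) (by simp) ?_ ?_
  · refine Or.inl (fun x hx => ?_)
    have := hdom'.1 x ((PySem.List.mem_sorted scoville (fun x => x) false x).mp hx)
    omega
  · intro pre e post h
    simp at h
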